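-- pv_equiv track=rewrite | github.com/TavoStatic/nova | services/nova_identity_preferences.py | pick_color_for_animals
-- ===== SOURCE A (Python) =====
-- def pick_color_for_animals(colors: list[str], animals: list[str]) -> str:
--     if not colors:
--         return ""
--     if len(colors) == 1:
--         return colors[0]
--
--     score = {color: 0 for color in colors}
--     for color in colors:
--         color_lower = color.lower()
--         for animal in animals:
--             animal_lower = animal.lower()
--             if animal_lower in {"birds", "parrots", "eagles", "hawks"} and color_lower in {"red", "blue", "green", "yellow", "orange"}:
--                 score[color] += 2
--             if animal_lower in {"dogs", "cats", "horses"} and color_lower in {"brown", "black", "white", "gray", "grey", "silver", "gold"}: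
--                 score[color] += 1
--     best = sorted(colors, key=lambda color: score.get(color, 0), reverse=True)
--     return best[0]
-- ===== SOURCE B (Python) =====
-- BIRD_ANIMALS = {"birds", "parrots", "eagles", "hawks"}
-- PET_ANIMALS = {"dogs", "cats", "horses"}
-- BRIGHT_COLORS = {"red", "blue", "green", "yellow", "orange"}
-- NEUTRAL_COLORS = {"brown", "black", "white", "gray", "grey", "silver", "gold"}
--
--
-- def pick_color_for_animals(colors: list[str], animals: list[str]) -> str:
--     if not colors:
--         return ""
--     bird = pet = 0
--     for animal in animals:
--         al = animal.lower()
--         if al in BIRD_ANIMALS: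
--             bird += 1
--         if al in PET_ANIMALS:
--             pet += 1
--     scores = {}
--     for color in colors:
--         cl = color.lower()
--         base = 2 * bird if cl in BRIGHT_COLORS else (pet if cl in NEUTRAL_COLORS else 0)
--         scores[color] = scores.get(color, 0) + base
--     best = colors[0]
--     for color in colors:
--         if scores[color] > scores[best]:
--             best = color
--     return best
-- ===== Notes on version B (the rewrite author's own statement) =====
-- stated objective: faster
-- what changed: B counts bird-category and pet-category animals once, computes each color's score in O(1) from those two counts plus the color's multiplicity, and picks the first maximal color with a running-argmax loop instead of scoring each color by rescanning all animals and stable-reverse-sorting the colors.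
import Mathlib
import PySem

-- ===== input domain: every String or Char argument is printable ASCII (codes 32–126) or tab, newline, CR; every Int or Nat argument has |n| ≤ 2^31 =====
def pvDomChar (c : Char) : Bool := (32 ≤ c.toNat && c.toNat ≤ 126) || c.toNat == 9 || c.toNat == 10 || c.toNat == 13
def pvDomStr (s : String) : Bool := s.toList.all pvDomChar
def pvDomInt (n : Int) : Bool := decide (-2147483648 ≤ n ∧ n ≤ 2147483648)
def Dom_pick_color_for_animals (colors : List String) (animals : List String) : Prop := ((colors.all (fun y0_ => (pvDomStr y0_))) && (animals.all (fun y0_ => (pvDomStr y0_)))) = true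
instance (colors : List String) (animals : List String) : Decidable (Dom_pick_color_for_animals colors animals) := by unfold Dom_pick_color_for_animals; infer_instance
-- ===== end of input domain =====

-- B counts the two animal categories once and picks the first maximal color with a running
-- argmax instead of rescanning all animals per color and stable-reverse-sorting the colors.

-- ===== PORT A =====
def pick_color_for_animals (colors : List String) (animals : List String) : String :=
  if colors.isEmpty then ""
  else if colors.length = 1 then colors.headD "" -- colors[0]: in range since len(colors) == 1
  else
    let score : PySem.Dict String Int := colors.foldl (fun d c => d.insert c 0) PySem.Dict.empty
    let score := colors.foldl (fun d color =>
      let color_lower := PySem.Str.lower color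
      animals.foldl (fun d animal =>
        let animal_lower := PySem.Str.lower animal
        -- score[color] += 2 / += 1: the key is always present (score was initialised over
        -- colors), so Python's item assignment is exactly 'modify color 0 (· + k)' here
        let d := if (PySem.Set.ofList ["birds","parrots","eagles","hawks"]).contains animal_lower
                    && (PySem.Set.ofList ["red","blue","green","yellow","orange"]).contains color_lower
                 then d.modify color 0 (· + 2) else d
        if (PySem.Set.ofList ["dogs","cats","horses"]).contains animal_lower
            && (PySem.Set.ofList ["brown","black","white","gray","grey","silver","gold"]).contains color_lower
        then d.modify color 0 (· + 1) else d) d) score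
    let best := PySem.List.sorted colors (fun color => score.getD color 0) true
    best.headD "" -- best[0]: in range since best is a permutation of the nonempty colors

-- ===== PORT B =====
def pvB_birds : PySem.Set String := PySem.Set.ofList ["birds","parrots","eagles","hawks"]
def pvB_pets : PySem.Set String := PySem.Set.ofList ["dogs","cats","horses"]
def pvB_bright : PySem.Set String := PySem.Set.ofList ["red","blue","green","yellow","orange"]
def pvB_neutral : PySem.Set String := PySem.Set.ofList ["brown","black","white","gray","grey","silver","gold"]

def pick_color_for_animals_alt (colors : List String) (animals : List String) : String :=
  match colors with
  | [] => ""
  | c0 :: _ =>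
    let bp : Int × Int := animals.foldl (fun bp animal =>
        let al := PySem.Str.lower animal
        let bp := if pvB_birds.contains al then (bp.1 + 1, bp.2) else bp
        if pvB_pets.contains al then (bp.1, bp.2 + 1) else bp) (0, 0)
    let scores : PySem.Dict String Int := colors.foldl (fun d color =>
        let cl := PySem.Str.lower color
        let base : Int := if pvB_bright.contains cl then 2 * bp.1
                          else if pvB_neutral.contains cl then bp.2 else 0
        d.insert color (d.getD color 0 + base)) PySem.Dict.empty
    colors.foldl (fun best color =>
        if scores.getD color 0 > scores.getD best 0 then color else best) c0

-- ===== PRECONDITION & SPEC =====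
def Spec_pick_color_for_animals (colors : List String) (animals : List String) (out : String) : Prop := out = pick_color_for_animals_alt colors animals
instance (colors : List String) (animals : List String) (out : String) : Decidable (Spec_pick_color_for_animals colors animals out) := by unfold Spec_pick_color_for_animals; infer_instance

-- ===== CLAIM (what is proved, stated in full; the proofs are below) =====
def Claim_equal_pick_color_for_animals : Prop := ∀ (colors : List String) (animals : List String), Dom_pick_color_for_animals colors animals → Spec_pick_color_for_animals colors animals (pick_color_for_animals colors animals)

-- ===== LEMMAS AND PROOFS =====

def pvBirdCnt (animals : List String) : Int :=
  (animals.countP (fun a => (PySem.Set.ofList ["birds","parrots","eagles","hawks"]).contains (PySem.Str.lower a)) : Int)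
def pvPetCnt (animals : List String) : Int :=
  (animals.countP (fun a => (PySem.Set.ofList ["dogs","cats","horses"]).contains (PySem.Str.lower a)) : Int)
-- the per-occurrence amount A's inner loop adds to a color whose lowercase form is cl
def pvAmt (animals : List String) (cl : String) : Int :=
  (if (PySem.Set.ofList ["red","blue","green","yellow","orange"]).contains cl then 2 * pvBirdCnt animals else 0)
  + (if (PySem.Set.ofList ["brown","black","white","gray","grey","silver","gold"]).contains cl then pvPetCnt animals else 0)
-- the final score of color x in both programs
def pvScore (colors animals : List String) (x : String) : Int :=
  (colors.count x : Int) * pvAmt animals (PySem.Str.lower x)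

lemma pvAmt_eq_pvBase (animals : List String) (cl : String) :
    pvAmt animals cl
      = (if pvB_bright.contains cl then 2 * pvBirdCnt animals
         else if pvB_neutral.contains cl then pvPetCnt animals else 0) := by
  unfold pvAmt pvB_bright pvB_neutral
  by_cases h1 : (cl = "red" ∨ cl = "blue" ∨ cl = "green" ∨ cl = "yellow" ∨ cl = "orange") <;>
    by_cases h2 : (cl = "brown" ∨ cl = "black" ∨ cl = "white" ∨ cl = "gray" ∨ cl = "grey" ∨ cl = "silver" ∨ cl = "gold") <;>
      simp [h1, h2]
  rcases h1 with rfl|rfl|rfl|rfl|rfl <;> simp_all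

-- head of an insertion-sort fold = running "first strict max" fold
lemma pv_headD_foldl_insertBy (before : String → String → Bool) (xs : List String) :
    ∀ (acc : List String), acc ≠ [] →
    (xs.foldl (fun a x => PySem.List.insertBy before x a) acc).headD ""
      = xs.foldl (fun b c => if before c b then c else b) (acc.headD "") := by
  induction xs with
  | nil => intro acc h; rfl
  | cons x xs ih =>
    intro acc h
    obtain ⟨a, as, rfl⟩ := List.exists_cons_of_ne_nil h
    simp only [List.foldl_cons]
    rw [ih _ (by simp [PySem.List.insertBy]; split <;> simp)]
    congr 1
    simp [PySem.List.insertBy]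
    split <;> simp

lemma pv_score_init (colors : List String) :
    ∀ (d : PySem.Dict String Int), (∀ j, d.getD j 0 = 0) →
    ∀ k, (colors.foldl (fun d c => d.insert c 0) d).getD k 0 = 0 := by
  induction colors with
  | nil => intro d h k; exact h k
  | cons c cs ih =>
    intro d h k
    simp only [List.foldl_cons]
    exact ih _ (fun j => by rw [PySem.Dict.getD_insert]; split <;> simp [h j]) k

lemma pv_scoreA_inner (animals : List String) (color k : String) :
    ∀ (d : PySem.Dict String Int),
    (animals.foldl (fun d animal =>
        let animal_lower := PySem.Str.lower animal
        let d := if (PySem.Set.ofList ["birds","parrots","eagles","hawks"]).contains animal_lower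
                    && (PySem.Set.ofList ["red","blue","green","yellow","orange"]).contains (PySem.Str.lower color)
                 then d.modify color 0 (· + 2) else d
        if (PySem.Set.ofList ["dogs","cats","horses"]).contains animal_lower
            && (PySem.Set.ofList ["brown","black","white","gray","grey","silver","gold"]).contains (PySem.Str.lower color)
        then d.modify color 0 (· + 1) else d) d).getD k 0
      = d.getD k 0 + (if k = color then pvAmt animals (PySem.Str.lower color) else 0) := by
  induction animals with
  | nil => intro d; simp [pvAmt, pvBirdCnt, pvPetCnt]
  | cons a as ih =>
    intro d
    simp only [List.foldl_cons]
    rw [ih]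
    cases hb : (PySem.Set.ofList ["birds","parrots","eagles","hawks"]).contains (PySem.Str.lower a) <;>
    cases hp : (PySem.Set.ofList ["dogs","cats","horses"]).contains (PySem.Str.lower a) <;>
    cases hbr : (PySem.Set.ofList ["red","blue","green","yellow","orange"]).contains (PySem.Str.lower color) <;>
    cases hne : (PySem.Set.ofList ["brown","black","white","gray","grey","silver","gold"]).contains (PySem.Str.lower color) <;>
      simp only [hb, hp, hbr, hne, Bool.and_false, Bool.and_true, Bool.false_eq_true,
        if_false, if_true, ite_false, ite_true,
        PySem.Dict.getD_modify, pvAmt, pvBirdCnt, pvPetCnt, List.countP_cons] <;>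
      split_ifs <;> (try subst_vars) <;> push_cast <;> omega

lemma pv_scoreA_total (animals : List String) (colors : List String) (k : String) :
    ∀ (d : PySem.Dict String Int),
    (colors.foldl (fun d color =>
      let color_lower := PySem.Str.lower color
      animals.foldl (fun d animal =>
        let animal_lower := PySem.Str.lower animal
        let d := if (PySem.Set.ofList ["birds","parrots","eagles","hawks"]).contains animal_lower
                    && (PySem.Set.ofList ["red","blue","green","yellow","orange"]).contains color_lower
                 then d.modify color 0 (· + 2) else d
        if (PySem.Set.ofList ["dogs","cats","horses"]).contains animal_lower
            && (PySem.Set.ofList ["brown","black","white","gray","grey","silver","gold"]).contains color_lower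
        then d.modify color 0 (· + 1) else d) d) d).getD k 0
      = d.getD k 0 + (colors.count k : Int) * pvAmt animals (PySem.Str.lower k) := by
  induction colors with
  | nil => intro d; simp
  | cons c cs ih =>
    intro d
    simp only [List.foldl_cons]
    rw [ih, pv_scoreA_inner]
    by_cases hkc : k = c
    · subst hkc; simp; push_cast; ring
    · simp [hkc, Ne.symm hkc]

lemma pv_bp_eq (animals : List String) :
    ∀ p : Int × Int,
    (animals.foldl (fun bp animal =>
        let al := PySem.Str.lower animal
        let bp := if pvB_birds.contains al then (bp.1 + 1, bp.2) else bp
        if pvB_pets.contains al then (bp.1, bp.2 + 1) else bp) p)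
      = (p.1 + pvBirdCnt animals, p.2 + pvPetCnt animals) := by
  induction animals with
  | nil => intro p; simp [pvBirdCnt, pvPetCnt]
  | cons a as ih =>
    intro p
    simp only [List.foldl_cons]
    rw [ih]
    unfold pvBirdCnt pvPetCnt pvB_birds pvB_pets
    simp only [List.countP_cons]
    by_cases h1 : (PySem.Str.lower a = "birds" ∨ PySem.Str.lower a = "parrots" ∨ PySem.Str.lower a = "eagles" ∨ PySem.Str.lower a = "hawks") <;>
      by_cases h2 : (PySem.Str.lower a = "dogs" ∨ PySem.Str.lower a = "cats" ∨ PySem.Str.lower a = "horses") <;>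
        simp [h1, h2, Prod.ext_iff] <;> omega

lemma pv_scoreB (bird pet : Int) (colors : List String) (k : String) :
    ∀ (d : PySem.Dict String Int),
    (colors.foldl (fun d color =>
        let cl := PySem.Str.lower color
        let base : Int := if pvB_bright.contains cl then 2 * bird
                          else if pvB_neutral.contains cl then pet else 0
        d.insert color (d.getD color 0 + base)) d).getD k 0
      = d.getD k 0 + (colors.count k : Int) *
          (if pvB_bright.contains (PySem.Str.lower k) then 2 * bird
           else if pvB_neutral.contains (PySem.Str.lower k) then pet else 0) := by
  induction colors with
  | nil => intro d; simp
  | cons c cs ih =>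
    intro d
    simp only [List.foldl_cons]
    rw [ih, PySem.Dict.getD_insert]
    by_cases hkc : k = c
    · subst hkc; simp; push_cast; split_ifs <;> ring
    · simp [hkc, Ne.symm hkc]

lemma pv_headD_sorted_rev (key : String → Int) (x : String) (xs : List String) :
    (PySem.List.sorted (x :: xs) key true).headD ""
      = xs.foldl (fun b c => if key b < key c then c else b) x := by
  rw [PySem.List.sorted_rev_eq_foldl_insertBy]
  simp only [List.foldl_cons]
  have h1 : PySem.List.insertBy (fun a b => decide (key b < key a)) x [] = [x] := rfl
  rw [h1, pv_headD_foldl_insertBy _ xs [x] (by simp)]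
  simp

lemma pv_foldl_key_congr (f g : String → Int) (h : ∀ x, f x = g x) (xs : List String) (b0 : String) :
    xs.foldl (fun b c => if f b < f c then c else b) b0
      = xs.foldl (fun b c => if g b < g c then c else b) b0 := by
  have hfg : (fun b c => if f b < f c then c else b) = (fun b c => if g b < g c then c else b) := by
    funext b c; rw [h b, h c]
  rw [hfg]

lemma pv_keyA (colors animals : List String) (x : String) :
    (colors.foldl (fun d color =>
      let color_lower := PySem.Str.lower color
      animals.foldl (fun d animal =>
        let animal_lower := PySem.Str.lower animal
        let d := if (PySem.Set.ofList ["birds","parrots","eagles","hawks"]).contains animal_lower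
                    && (PySem.Set.ofList ["red","blue","green","yellow","orange"]).contains color_lower
                 then d.modify color 0 (· + 2) else d
        if (PySem.Set.ofList ["dogs","cats","horses"]).contains animal_lower
            && (PySem.Set.ofList ["brown","black","white","gray","grey","silver","gold"]).contains color_lower
        then d.modify color 0 (· + 1) else d) d)
      (colors.foldl (fun d c => d.insert c 0) PySem.Dict.empty)).getD x 0
      = pvScore colors animals x := by
  rw [pv_scoreA_total, pv_score_init colors PySem.Dict.empty (fun j => by simp) x]
  simp [pvScore]

lemma pv_keyB (colors animals : List String) (x : String) :
    (colors.foldl (fun d color =>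
        let cl := PySem.Str.lower color
        let base : Int := if pvB_bright.contains cl then 2 * (0 + pvBirdCnt animals)
                          else if pvB_neutral.contains cl then 0 + pvPetCnt animals else 0
        d.insert color (d.getD color 0 + base)) PySem.Dict.empty).getD x 0
      = pvScore colors animals x := by
  rw [pv_scoreB]
  simp [pvScore, pvAmt_eq_pvBase]

theorem pv_main_big (c0 c1 : String) (rest animals : List String) :
    pick_color_for_animals (c0 :: c1 :: rest) animals
      = pick_color_for_animals_alt (c0 :: c1 :: rest) animals := by
  unfold pick_color_for_animals pick_color_for_animals_alt
  rw [if_neg (by simp), if_neg (by simp)]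
  rw [pv_bp_eq]
  dsimp only
  rw [pv_headD_sorted_rev]
  rw [pv_foldl_key_congr _ _ (pv_keyA (c0 :: c1 :: rest) animals)]
  simp only [gt_iff_lt]
  rw [pv_foldl_key_congr _ _ (pv_keyB (c0 :: c1 :: rest) animals)]
  conv_rhs => rw [List.foldl_cons]
  rw [if_neg (lt_irrefl _)]

-- ===== VERDICT (by name: the statement is the Claim_ definition above) =====
theorem pick_color_for_animals_spec : Claim_equal_pick_color_for_animals := by
  intro colors animals _
  unfold Spec_pick_color_for_animals
  match colors with
  | [] => rfl
  | [c0] => unfold pick_color_for_animals pick_color_for_animals_alt; simp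
  | c0 :: c1 :: rest => exact pv_main_big c0 c1 rest animals
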